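-- pv_equiv track=rewrite | github.com/aadishv/aoc | 2024/d3/main.py | parse_inp
-- ===== SOURCE A (Python) =====
-- def parse_inp(inp):
--     pos = [(0,0)]
--     for j in inp:
--         if j == '>':
--             pos.append((pos[-1][0]+1, pos[-1][1]))
--         elif j == '<':
--             pos.append((pos[-1][0]-1, pos[-1][1]))
--         elif j == '^':
--             pos.append((pos[-1][0], pos[-1][1]+1))
--         elif j == 'v':
--             pos.append((pos[-1][0], pos[-1][1]-1))
--     return pos
-- ===== SOURCE B (Python) =====
-- _DELTAS = {'>': (1, 0), '<': (-1, 0), '^': (0, 1), 'v': (0, -1)}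
--
-- def parse_inp(inp):
--     # Divide and conquer: positions of a concatenation are the left half's
--     # positions followed by the right half's positions translated by the
--     # left half's endpoint.
--     if len(inp) <= 1:
--         d = _DELTAS.get(inp[0]) if inp else None
--         return [(0, 0)] if d is None else [(0, 0), d]
--     m = len(inp) // 2
--     left = parse_inp(inp[:m])
--     right = parse_inp(inp[m:])
--     ox, oy = left[-1]
--     return left + [(ox + x, oy + y) for (x, y) in right[1:]]
-- ===== Notes on version B (the rewrite author's own statement) =====
-- stated objective: alternative
-- what changed: Replaced A's sequential conditional-append loop with a divide-and-conquer algorithm: split the string in half, recursively compute each half's positions relative to (0,0), and merge by translating the right half's positions (minus its leading origin) by the left half's endpoint.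
import Mathlib
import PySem

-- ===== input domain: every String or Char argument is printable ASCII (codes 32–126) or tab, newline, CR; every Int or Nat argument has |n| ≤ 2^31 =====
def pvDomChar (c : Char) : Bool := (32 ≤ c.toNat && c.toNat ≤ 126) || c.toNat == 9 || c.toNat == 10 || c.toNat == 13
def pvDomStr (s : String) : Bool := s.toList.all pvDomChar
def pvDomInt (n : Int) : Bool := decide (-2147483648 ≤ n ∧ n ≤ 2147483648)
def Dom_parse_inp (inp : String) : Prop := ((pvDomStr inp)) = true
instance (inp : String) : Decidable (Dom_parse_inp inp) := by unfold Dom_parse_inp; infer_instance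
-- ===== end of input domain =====

-- B replaces A's sequential conditional-append loop with a divide-and-conquer computation
-- (solve halves, translate the right half by the left endpoint); objective: alternative.

-- ===== PORT A =====
-- A keeps the whole growing list as loop state and appends pos[-1]+delta; pos is never
-- empty, so pos[-1] is its last element (getLast! is exact here).
def parse_inp (inp : String) : List (Int × Int) :=
  inp.toList.foldl (fun pos j =>
    if j = '>' then pos ++ [(((pos.getLast!).1 + 1, (pos.getLast!).2) : Int × Int)]
    else if j = '<' then pos ++ [((pos.getLast!).1 - 1, (pos.getLast!).2)]
    else if j = '^' then pos ++ [((pos.getLast!).1, (pos.getLast!).2 + 1)]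
    else if j = 'v' then pos ++ [((pos.getLast!).1, (pos.getLast!).2 - 1)]
    else pos) [(0, 0)]

-- ===== PORT B =====
-- _DELTAS.get(c): classify a character as a 2D delta (none = unrecognised)
def pvDelta? (c : Char) : Option (Int × Int) :=
  if c = '>' then some (1, 0)
  else if c = '<' then some (-1, 0)
  else if c = '^' then some (0, 1)
  else if c = 'v' then some (0, -1)
  else none

-- divide and conquer on the character list (Source B's recursion on string halves;
-- left[-1] is left.getLast!, exact since the result is never empty)
def pvSolve (s : List Char) : List (Int × Int) :=
  if _h : s.length ≤ 1 then
    match s with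
    | [] => [(0, 0)]
    | c :: _ => match pvDelta? c with | none => [(0, 0)] | some d => [(0, 0), d]
  else
    let m := s.length / 2
    let left := pvSolve (s.take m)
    let right := pvSolve (s.drop m)
    let o := left.getLast!
    left ++ (right.drop 1).map (fun p => (o.1 + p.1, o.2 + p.2))
termination_by s.length
decreasing_by
  · simp [List.length_take]; omega
  · simp [List.length_drop]; omega

def parse_inp_alt (inp : String) : List (Int × Int) := pvSolve inp.toList

-- ===== PRECONDITION & SPEC =====
def Spec_parse_inp (inp : String) (out : List (Int × Int)) : Prop := out = parse_inp_alt inp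
instance (inp : String) (out : List (Int × Int)) : Decidable (Spec_parse_inp inp out) := by unfold Spec_parse_inp; infer_instance

-- ===== CLAIM (what is proved, stated in full; the proofs are below) =====
def Claim_equal_parse_inp : Prop := ∀ (inp : String), Dom_parse_inp inp → Spec_parse_inp inp (parse_inp inp)

-- ===== LEMMAS AND PROOFS =====

-- the common reference value: the scan of the recognised deltas
def pvAdd (p d : Int × Int) : Int × Int := (p.1 + d.1, p.2 + d.2)

def pvScan (s : List Char) : List (Int × Int) :=
  (s.filterMap pvDelta?).scanl pvAdd (0, 0)

theorem pv_getLast!_concat (p : Int × Int) (ps : List (Int × Int)) :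
    (ps ++ [p]).getLast! = p := by
  induction ps with
  | nil => rfl
  | cons a as ih => simp [List.getLast!, List.getLast]

-- A's fold equals the scan (invariant over the growing list)
theorem pv_A_inv (l : List Char) (p : Int × Int) (ps : List (Int × Int)) :
    l.foldl (fun pos j =>
      if j = '>' then pos ++ [(((pos.getLast!).1 + 1, (pos.getLast!).2) : Int × Int)]
      else if j = '<' then pos ++ [((pos.getLast!).1 - 1, (pos.getLast!).2)]
      else if j = '^' then pos ++ [((pos.getLast!).1, (pos.getLast!).2 + 1)]
      else if j = 'v' then pos ++ [((pos.getLast!).1, (pos.getLast!).2 - 1)]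
      else pos) (ps ++ [p])
    = ps ++ (l.filterMap pvDelta?).scanl pvAdd p := by
  induction l generalizing p ps with
  | nil => simp [List.scanl]
  | cons c l ih =>
    have hlast : (ps ++ [p]).getLast! = p := pv_getLast!_concat p ps
    by_cases h1 : c = '>'
    · simpa [h1, List.foldl_cons, pvDelta?, pvAdd, hlast, List.scanl, List.append_assoc] using
        ih (p.1 + 1, p.2) (ps ++ [p])
    · by_cases h2 : c = '<'
      · simpa [h1, h2, List.foldl_cons, pvDelta?, pvAdd, hlast, List.scanl, List.append_assoc] using
          ih (p.1 - 1, p.2) (ps ++ [p])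
      · by_cases h3 : c = '^'
        · simpa [h1, h2, h3, List.foldl_cons, pvDelta?, pvAdd, hlast, List.scanl, List.append_assoc] using
            ih (p.1, p.2 + 1) (ps ++ [p])
        · by_cases h4 : c = 'v'
          · simpa [h1, h2, h3, h4, List.foldl_cons, pvDelta?, pvAdd, hlast, List.scanl, List.append_assoc] using
              ih (p.1, p.2 - 1) (ps ++ [p])
          · simpa [h1, h2, h3, h4, List.foldl_cons, pvDelta?] using ih p ps

-- shifting the start of a scan translates every element
theorem pv_scanl_shift (l : List (Int × Int)) (a b : Int × Int) :
    l.scanl pvAdd (pvAdd a b) = (l.scanl pvAdd b).map (fun p => (a.1 + p.1, a.2 + p.2)) := by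
  induction l generalizing b with
  | nil => simp [List.scanl_nil, pvAdd]
  | cons d l ih =>
    have hstep : pvAdd (pvAdd a b) d = pvAdd a (pvAdd b d) := by
      simp only [pvAdd, Prod.mk.injEq]; constructor <;> ring
    rw [List.scanl_cons, List.scanl_cons, List.map_cons, hstep, ih (pvAdd b d)]
    rfl

theorem pv_getLast!_cons_cons (a b : Int × Int) (l : List (Int × Int)) :
    (a :: b :: l).getLast! = (b :: l).getLast! := by
  simp [List.getLast!, List.getLast]

theorem pv_scanl_getLast! (l : List (Int × Int)) (a : Int × Int) :
    (l.scanl pvAdd a).getLast! = l.foldl pvAdd a := by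
  induction l generalizing a with
  | nil => rfl
  | cons d l ih =>
    rcases h : l.scanl pvAdd (pvAdd a d) with _ | ⟨x, xs⟩
    · exact absurd (congrArg List.length h) (by simp [List.length_scanl])
    · rw [List.scanl_cons, List.foldl_cons, h, pv_getLast!_cons_cons, ← h, ih (pvAdd a d)]

-- splitting a scan: the right part is the scan from the left part's endpoint
theorem pv_scanl_append (l₁ l₂ : List (Int × Int)) (a : Int × Int) :
    (l₁ ++ l₂).scanl pvAdd a
      = l₁.scanl pvAdd a ++ (l₂.scanl pvAdd (l₁.foldl pvAdd a)).drop 1 := by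
  induction l₁ generalizing a with
  | nil =>
    rcases l₂ with _ | ⟨d, l⟩ <;> simp [List.scanl_nil, List.scanl_cons]
  | cons d l ih =>
    rw [List.cons_append, List.scanl_cons, List.scanl_cons, List.foldl_cons,
      ih (pvAdd a d), List.cons_append]

-- B's divide-and-conquer equals the scan
theorem pv_solve_eq_scan (s : List Char) : pvSolve s = pvScan s := by
  induction s using pvSolve.induct with
  | case1 h h' =>
    rw [pvSolve]
    simp [pvScan, List.scanl_nil]
  | case2 c t h heq h' =>
    have hb : t = [] := by
      rcases t with _ | _
      · rfl
      · simp at h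
    subst hb
    rw [pvSolve]
    simp [heq, pvScan, List.scanl_nil]
  | case3 c t h d heq h' =>
    have hb : t = [] := by
      rcases t with _ | _
      · rfl
      · simp at h
    subst hb
    rw [pvSolve]
    simp [heq, pvScan, List.scanl_cons, List.scanl_nil, pvAdd]
  | case4 s h m ihl ihr =>
    rw [pvSolve]
    simp only [dif_neg h]
    rw [ihl, ihr]
    have hsplit : s.filterMap pvDelta? =
        (s.take (s.length / 2)).filterMap pvDelta? ++ (s.drop (s.length / 2)).filterMap pvDelta? := by
      rw [← List.filterMap_append, List.take_append_drop]
    have key := pv_scanl_append ((s.take (s.length / 2)).filterMap pvDelta?)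
      ((s.drop (s.length / 2)).filterMap pvDelta?) ((0, 0) : Int × Int)
    have hlast : (pvScan (s.take (s.length / 2))).getLast!
        = ((s.take (s.length / 2)).filterMap pvDelta?).foldl pvAdd (0, 0) := by
      unfold pvScan; exact pv_scanl_getLast! _ _
    have hshift : ((s.drop (s.length / 2)).filterMap pvDelta?).scanl pvAdd
          (((s.take (s.length / 2)).filterMap pvDelta?).foldl pvAdd (0, 0))
        = (pvScan (s.drop (s.length / 2))).map
            (fun p => ((pvScan (s.take (s.length / 2))).getLast!.1 + p.1,
                       (pvScan (s.take (s.length / 2))).getLast!.2 + p.2)) := by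
      rw [hlast]
      have h0 : ((s.take (s.length / 2)).filterMap pvDelta?).foldl pvAdd ((0,0) : Int × Int)
          = pvAdd (((s.take (s.length / 2)).filterMap pvDelta?).foldl pvAdd (0,0)) (0,0) := by
        simp [pvAdd]
      rw [h0, pv_scanl_shift]
      simp [pvScan, pvAdd]
    conv_rhs => rw [pvScan, hsplit, key]
    rw [hshift, ← pvScan, List.map_drop]

-- ===== VERDICT (by name: the statement is the Claim_ definition above) =====
theorem parse_inp_spec : Claim_equal_parse_inp := by
  intro inp _
  unfold Spec_parse_inp parse_inp parse_inp_alt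
  rw [pv_solve_eq_scan]
  simpa [pvScan] using pv_A_inv inp.toList (0, 0) []
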